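-- pv_equiv track=rewrite | github.com/hyfan1116/playground | oa/abc.py | solution
-- ===== SOURCE A (Python) =====
-- def solution(S):
--     # write your code in Python 2.7
--     if 'A' not in S and 'C' not in S:
--         return S
--     else:
--         result = ""
--         for c in S:
--             if c != 'B':
--                 current = c
--                 break
--         for c in S:
--             if c == 'B' or c == current:
--                 pass
--             else:
--                 result = result+current
--                 current = c
--         result = result+current
--         return result
--     pass
-- ===== SOURCE B (Python) =====
-- def solution(S):
--     if 'A' not in S and 'C' not in S:
--         return S
--     out = []
--     i = 0
--     n = len(S)
--     while i < n:
--         c = S[i]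
--         if c == 'B':
--             i += 1
--             continue
--         out.append(c)
--         while i < n and (S[i] == 'B' or S[i] == c):
--             i += 1
--     return ''.join(out)
-- ===== Notes on version B (the rewrite author's own statement) =====
-- stated objective: alternative
-- what changed: A's per-character emit-on-transition state machine (with 'current' and a final flush) is replaced by index-based two-pointer run skipping: an outer while loop emits the first character of each run into a list, and an inner while loop advances the index past the whole run of that character and interleaved 'B's.
import Mathlib
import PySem

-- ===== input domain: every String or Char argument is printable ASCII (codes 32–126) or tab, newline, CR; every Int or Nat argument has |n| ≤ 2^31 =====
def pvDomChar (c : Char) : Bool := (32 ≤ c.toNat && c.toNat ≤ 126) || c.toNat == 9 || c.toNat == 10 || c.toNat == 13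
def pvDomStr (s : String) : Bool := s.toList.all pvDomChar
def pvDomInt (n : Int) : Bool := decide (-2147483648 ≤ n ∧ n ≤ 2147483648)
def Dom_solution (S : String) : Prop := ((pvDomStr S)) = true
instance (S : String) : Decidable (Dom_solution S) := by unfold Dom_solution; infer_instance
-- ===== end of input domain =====

-- B replaces A's per-character emit-on-transition state machine by two-pointer run skipping:
-- an outer loop emits the first character of each run, an inner loop skips the rest of the run
-- (and interleaved 'B's). Same cost, different traversal structure.

-- ===== PORT A =====
-- first loop of A: find the first non-'B' character (break)
def firstNonB : List Char → Option Char
  | [] => none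
  | c :: rest => if c ≠ 'B' then some c else firstNonB rest

-- second loop of A: state (result, current); skip 'B' and repeats of current, else emit
def loopA : List Char → List Char → Char → List Char × Char
  | [], result, current => (result, current)
  | c :: rest, result, current =>
      if c = 'B' ∨ c = current then loopA rest result current
      else loopA rest (result ++ [current]) c

def solution (S : String) : String :=
  if !(S.toList.contains 'A') && !(S.toList.contains 'C') then S
  else
    match firstNonB S.toList with
    | none => ""  -- unreachable: the guard guarantees a non-'B' character exists
    | some cur =>
        let p := loopA S.toList [] cur
        String.ofList (p.1 ++ [p.2])

-- ===== PORT B =====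
-- B's inner while loop: advance past characters equal to 'B' or to c
def skipRun : Char → List Char → List Char
  | _, [] => []
  | c, d :: rest => if d = 'B' ∨ d = c then skipRun c rest else d :: rest

theorem skipRun_length : ∀ (c : Char) (l : List Char), (skipRun c l).length ≤ l.length
  | _, [] => by simp [skipRun]
  | c, d :: rest => by
      by_cases h : d = 'B' ∨ d = c
      · simpa [skipRun, h] using Nat.le_succ_of_le (skipRun_length c rest)
      · simp [skipRun, h]

-- B's outer while loop over the remaining suffix
def outerB : List Char → List Char
  | [] => []
  | c :: rest =>
      if c = 'B' then outerB rest
      else c :: outerB (skipRun c rest)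
  termination_by l => l.length
  decreasing_by
  · simp only [List.length_cons]; omega
  · have := skipRun_length c rest; simp only [List.length_cons]; omega

def solution_alt (S : String) : String :=
  if !(S.toList.contains 'A') && !(S.toList.contains 'C') then S
  else String.ofList (outerB S.toList)

-- ===== PRECONDITION & SPEC =====
def Spec_solution (S : String) (out : String) : Prop := out = solution_alt S
instance (S : String) (out : String) : Decidable (Spec_solution S out) := by unfold Spec_solution; infer_instance

-- ===== CLAIM (what is proved, stated in full; the proofs are below) =====
def Claim_equal_solution : Prop := ∀ (S : String), Dom_solution S → Spec_solution S (solution S)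

-- ===== LEMMAS AND PROOFS =====

-- common specification: run-length collapse of cur :: m
def rle : Char → List Char → List Char
  | cur, [] => [cur]
  | cur, c :: rest => if c = cur then rle cur rest else cur :: rle c rest

def rleAll : List Char → List Char
  | [] => []
  | c :: rest => rle c rest

theorem loopA_eq_rle : ∀ (l res : List Char) (cur : Char),
    (loopA l res cur).1 ++ [(loopA l res cur).2] = res ++ rle cur (l.filter (· ≠ 'B'))
  | [], res, cur => by simp [loopA, rle]
  | c :: rest, res, cur => by
      by_cases hb : c = 'B'
      · subst hb
        simp [loopA, List.filter, loopA_eq_rle rest res cur]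
      · by_cases hc : c = cur
        · subst hc
          simp [loopA, List.filter, hb, rle, loopA_eq_rle rest res c]
        · rw [show loopA (c :: rest) res cur = loopA rest (res ++ [cur]) c from by
            simp [loopA, hb, hc]]
          rw [loopA_eq_rle rest (res ++ [cur]) c]
          simp [List.filter, hb, rle, hc]

theorem rle_skipRun : ∀ (rest : List Char) (c : Char),
    rle c (rest.filter (· ≠ 'B')) = c :: rleAll ((skipRun c rest).filter (· ≠ 'B'))
  | [], c => by simp [skipRun, rle, rleAll]
  | d :: rest, c => by
      by_cases hb : d = 'B'
      · subst hb
        rw [show skipRun c ('B' :: rest) = skipRun c rest from by simp [skipRun],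
            List.filter_cons_of_neg (by simp)]
        exact rle_skipRun rest c
      · by_cases hc : d = c
        · subst hc
          rw [show skipRun d (d :: rest) = skipRun d rest from by simp [skipRun],
              List.filter_cons_of_pos (by simp [hb]),
              show rle d (d :: rest.filter (· ≠ 'B')) = rle d (rest.filter (· ≠ 'B')) from by
                simp [rle]]
          exact rle_skipRun rest d
        · simp [skipRun, hb, hc, List.filter, rle, rleAll]

theorem outerB_eq_rleAll : ∀ (l : List Char), outerB l = rleAll (l.filter (· ≠ 'B'))
  | [] => by simp [outerB, rleAll]
  | c :: rest => by
      by_cases hb : c = 'B'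
      · subst hb
        simp [outerB, List.filter, outerB_eq_rleAll rest]
      · rw [show outerB (c :: rest) = c :: outerB (skipRun c rest) from by simp [outerB, hb]]
        rw [outerB_eq_rleAll (skipRun c rest)]
        rw [List.filter_cons_of_pos (by simp [hb]), rleAll, ← rle_skipRun rest c]
  termination_by l => l.length
  decreasing_by
  · simp only [List.length_cons]; omega
  · have := skipRun_length c rest; simp only [List.length_cons]; omega

theorem firstNonB_filter : ∀ (l : List Char) (cur : Char), firstNonB l = some cur →
    ∃ t, l.filter (· ≠ 'B') = cur :: t
  | [], cur => by simp [firstNonB]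
  | c :: rest, cur => by
      intro h
      by_cases hb : c = 'B'
      · subst hb
        simp only [firstNonB, ne_eq, not_true_eq_false, if_false] at h
        obtain ⟨t, ht⟩ := firstNonB_filter rest cur h
        refine ⟨t, ?_⟩
        rw [List.filter_cons_of_neg (by simp)]
        exact ht
      · rw [firstNonB, if_pos hb] at h
        cases h
        exact ⟨_, List.filter_cons_of_pos (by simp [hb])⟩

theorem firstNonB_of_mem {l : List Char} {c : Char} (hc : c ∈ l) (hb : c ≠ 'B') :
    ∃ cur, firstNonB l = some cur := by
  induction l with
  | nil => simp at hc
  | cons a rest ih =>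
      by_cases ha : a = 'B'
      · subst ha
        rcases List.mem_cons.mp hc with rfl | h
        · exact absurd rfl hb
        · obtain ⟨cur, hcur⟩ := ih h
          exact ⟨cur, by simp [firstNonB, hcur]⟩
      · exact ⟨a, by simp [firstNonB, ha]⟩

-- ===== VERDICT (by name: the statement is the Claim_ definition above) =====
theorem solution_spec : Claim_equal_solution := by
  intro S _
  unfold Spec_solution solution solution_alt
  cases hg : (!(S.toList.contains 'A') && !(S.toList.contains 'C')) with
  | true => simp
  | false =>
    simp only [Bool.false_eq_true, if_false]
    have hmem : ('A' ∈ S.toList) ∨ ('C' ∈ S.toList) := by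
      by_contra hcon
      push Not at hcon
      simp [hcon.1, hcon.2, List.contains_eq_mem] at hg
    have ⟨c, hc, hb⟩ : ∃ c ∈ S.toList, c ≠ 'B' := by
      rcases hmem with h | h
      · exact ⟨'A', h, by decide⟩
      · exact ⟨'C', h, by decide⟩
    obtain ⟨cur, hcur⟩ := firstNonB_of_mem hc hb
    obtain ⟨t, ht⟩ := firstNonB_filter _ cur hcur
    simp only [hcur, loopA_eq_rle, outerB_eq_rleAll, ht, rleAll, List.nil_append]
    simp [rle]
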